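-- pv_equiv track=rewrite | github.com/jmjules/AdventOfCode2024 | 04/p1.py | get_diagonals
-- ===== SOURCE A (Python) =====
-- def get_diagonals(test_grid: list):
--       rows = len(test_grid)
--       cols = len(test_grid[0])
--       diagonals = []
--
--       for d in range(rows + cols -1):
--             diag1 = []
--             diag2 = []
--             for i in range(rows):
--                   j1 = d - i
--                   j2 = cols - 1 - d + i
--                   if 0 <= j1 < cols:
--                         diag1.append(test_grid[i][j1])
--                   if 0 <= j2 < cols:
--                         diag2.append(test_grid[i][j2])
--             if diag1:
--                   diagonals.append(diag1)
--             if diag2: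
--                   diagonals.append(diag2)
--       return diagonals
-- ===== SOURCE B (Python) =====
-- def get_diagonals(test_grid: list):
--     rows = len(test_grid)
--     cols = len(test_grid[0])
--     n = rows + cols - 1
--     diag1 = [[] for _ in range(n)]
--     diag2 = [[] for _ in range(n)]
--     for i in range(rows):
--         for j in range(cols):
--             diag1[i + j].append(test_grid[i][j])
--             diag2[i - j + cols - 1].append(test_grid[i][j])
--     out = []
--     for a, b in zip(diag1, diag2):
--         if a:
--             out.append(a)
--         if b:
--             out.append(b)
--     return out
-- ===== Notes on version B (the rewrite author's own statement) =====
-- stated objective: faster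
-- what changed: B makes one row-major pass over the grid, bucketing each cell into its two diagonal buckets keyed by i+j and i-j+cols-1, then emits the buckets; A instead loops over every diagonal index and rescans all rows with bounds tests for each.
import Mathlib
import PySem

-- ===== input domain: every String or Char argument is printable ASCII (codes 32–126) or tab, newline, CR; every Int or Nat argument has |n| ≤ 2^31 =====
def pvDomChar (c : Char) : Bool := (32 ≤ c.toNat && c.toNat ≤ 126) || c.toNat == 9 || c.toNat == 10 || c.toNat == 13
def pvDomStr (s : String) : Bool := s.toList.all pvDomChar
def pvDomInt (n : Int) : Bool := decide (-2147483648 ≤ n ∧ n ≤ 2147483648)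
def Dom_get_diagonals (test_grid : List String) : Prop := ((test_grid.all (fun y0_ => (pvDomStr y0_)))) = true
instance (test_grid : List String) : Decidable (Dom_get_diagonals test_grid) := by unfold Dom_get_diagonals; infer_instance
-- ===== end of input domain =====

-- B buckets each cell into its two diagonals in one row-major pass (keys i+j and i-j+cols-1) instead of rescanning all rows for every diagonal index; asymptotically faster.


-- shared cell accessor: test_grid[i][j] as a 1-char string ("" impossible inside Pre_)
def pvCell (test_grid : List String) (i j : Int) : String :=
  (((PySem.List.pyGet? test_grid i).bind (fun s => PySem.Str.pyGet? s j)).map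
    (fun c => String.ofList [c])).getD ""

-- ===== PORT A =====
def get_diagonals (test_grid : List String) : List (List String) :=
  let rows : Int := test_grid.length
  let cols : Int := (((PySem.List.pyGet? test_grid 0).getD "").length : Int)
  (PySem.List.pyRange 0 (rows + cols - 1) 1).foldl (fun diagonals d =>
    let p := (PySem.List.pyRange 0 rows 1).foldl
      (fun (p : List String × List String) i =>
        let j1 := d - i
        let j2 := cols - 1 - d + i
        ((if 0 ≤ j1 ∧ j1 < cols then p.1 ++ [pvCell test_grid i j1] else p.1),
         (if 0 ≤ j2 ∧ j2 < cols then p.2 ++ [pvCell test_grid i j2] else p.2)))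
      ([], [])
    let diagonals := if p.1 ≠ [] then diagonals ++ [p.1] else diagonals
    if p.2 ≠ [] then diagonals ++ [p.2] else diagonals) []

-- ===== PORT B =====
-- diag1[k].append(c) / diag2[k].append(c); the bucket index is never negative here,
-- so `.toNat` is exact (no Python negative-index wraparound is ever exercised)
def pvBump (l : List (List String)) (k : Int) (x : String) : List (List String) :=
  l.modify k.toNat (· ++ [x])

def get_diagonals_alt (test_grid : List String) : List (List String) :=
  let rows : Int := test_grid.length
  let cols : Int := (((PySem.List.pyGet? test_grid 0).getD "").length : Int)
  let n : Int := rows + cols - 1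
  let p := (PySem.List.pyRange 0 rows 1).foldl
    (fun (p : List (List String) × List (List String)) i =>
      (PySem.List.pyRange 0 cols 1).foldl (fun q j =>
        (pvBump q.1 (i + j) (pvCell test_grid i j),
         pvBump q.2 (i - j + cols - 1) (pvCell test_grid i j))) p)
    (List.replicate n.toNat [], List.replicate n.toNat [])
  (p.1.zip p.2).foldl (fun out ab =>
    let out := if ab.1 ≠ [] then out ++ [ab.1] else out
    if ab.2 ≠ [] then out ++ [ab.2] else out) []

-- ===== PRECONDITION & SPEC =====
-- Pre_ excludes exactly the inputs on which Python A raises an IndexError: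
-- the empty grid (test_grid[0]) and grids with a row shorter than the first row.
def Pre_get_diagonals (test_grid : List String) : Prop :=
  test_grid ≠ [] ∧ ∀ s ∈ test_grid, test_grid.headI.length ≤ s.length
instance (test_grid : List String) : Decidable (Pre_get_diagonals test_grid) := by
  unfold Pre_get_diagonals; infer_instance
def pvWitness_get_diagonals : List String := ["ab", "cd"]
def Spec_get_diagonals (test_grid : List String) (out : List (List String)) : Prop := out = get_diagonals_alt test_grid
instance (test_grid : List String) (out : List (List String)) : Decidable (Spec_get_diagonals test_grid out) := by unfold Spec_get_diagonals; infer_instance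

-- ===== CLAIM (what is proved, stated in full; the proofs are below) =====
def Claim_equal_get_diagonals : Prop := ∀ (test_grid : List String), Dom_get_diagonals test_grid → Pre_get_diagonals test_grid → Spec_get_diagonals test_grid (get_diagonals test_grid)

-- ===== LEMMAS AND PROOFS =====

-- the d-th "/" diagonal and "\" diagonal of the first m rows
def pvD1 (g : List String) (cols m d : Int) : List String :=
  (PySem.List.pyRange (max 0 (d - cols + 1)) (min m (d + 1)) 1).map (fun i => pvCell g i (d - i))
def pvD2 (g : List String) (cols m d : Int) : List String :=
  (PySem.List.pyRange (max 0 (d - cols + 1)) (min m (d + 1)) 1).map (fun i => pvCell g i (cols - 1 - d + i))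

-- the shared output step of both programs
def pvEmit (acc : List (List String)) (a b : List String) : List (List String) :=
  let acc := if a ≠ [] then acc ++ [a] else acc
  if b ≠ [] then acc ++ [b] else acc

-- pair foldl with componentwise updates splits into two foldls
theorem pvFoldlProd {α β γ : Type} (f : β → α → β) (g : γ → α → γ) (l : List α) (b : β) (c : γ) :
    l.foldl (fun p x => (f p.1 x, g p.2 x)) (b, c) = (l.foldl f b, l.foldl g c) := by
  induction l generalizing b c with
  | nil => rfl
  | cons x xs ih => simpa using ih (f b x) (g c x)

theorem pvFoldlExt {α β : Type} {f g : β → α → β} (h : ∀ b a, f b a = g b a) (l : List α)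
    (b : β) : l.foldl f b = l.foldl g b := by
  induction l generalizing b with
  | nil => rfl
  | cons x xs ih => simp only [List.foldl_cons, h, ih]

theorem pvFilterPyRangeAux (lo hi : Int) (n : Nat) : ∀ a b : Int, (b - a).toNat = n →
    (PySem.List.pyRange a b 1).filter (fun i => decide (lo ≤ i ∧ i < hi)) =
      PySem.List.pyRange (max a lo) (min b hi) 1 := by
  induction n with
  | zero =>
    intro a b h
    rw [PySem.List.pyRange_one_eq_nil (by omega), PySem.List.pyRange_one_eq_nil (by omega)]
    rfl
  | succ n ih =>
    intro a b h
    rw [PySem.List.pyRange_one_cons (by omega), List.filter_cons]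
    by_cases hp : lo ≤ a ∧ a < hi
    · simp only [hp, and_self, decide_true, if_true]
      rw [ih (a + 1) b (by omega)]
      have h1 : max a lo = a := by omega
      have h2 : max (a + 1) lo = a + 1 := by omega
      rw [h1, h2,
        show PySem.List.pyRange a (min b hi) 1 = a :: PySem.List.pyRange (a + 1) (min b hi) 1
          from PySem.List.pyRange_one_cons (by omega)]
    · rw [if_neg (by simpa using hp)]
      rw [ih (a + 1) b (by omega)]
      rcases not_and_or.mp hp with hlt | hge
      · have : max a lo = max (a + 1) lo := by omega
        rw [this]
      · rw [PySem.List.pyRange_one_eq_nil (by omega),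
          PySem.List.pyRange_one_eq_nil (by omega)]

theorem pvFilterPyRange (lo hi a b : Int) :
    (PySem.List.pyRange a b 1).filter (fun i => decide (lo ≤ i ∧ i < hi)) =
      PySem.List.pyRange (max a lo) (min b hi) 1 :=
  pvFilterPyRangeAux lo hi (b - a).toNat a b rfl

-- A's step at diagonal index d builds exactly pvD1 and pvD2 of the full grid
theorem pvStepA (g : List String) (rows cols : Int) (acc : List (List String)) (d : Int) :
    (let p := (PySem.List.pyRange 0 rows 1).foldl
      (fun (p : List String × List String) i =>
        let j1 := d - i
        let j2 := cols - 1 - d + i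
        ((if 0 ≤ j1 ∧ j1 < cols then p.1 ++ [pvCell g i j1] else p.1),
         (if 0 ≤ j2 ∧ j2 < cols then p.2 ++ [pvCell g i j2] else p.2)))
      ([], [])
     let acc := if p.1 ≠ [] then acc ++ [p.1] else acc
     if p.2 ≠ [] then acc ++ [p.2] else acc) =
    pvEmit acc (pvD1 g cols rows d) (pvD2 g cols rows d) := by
  simp only [pvFoldlProd (fun l i => if 0 ≤ d - i ∧ d - i < cols then l ++ [pvCell g i (d - i)] else l)
    (fun l i => if 0 ≤ cols - 1 - d + i ∧ cols - 1 - d + i < cols then l ++ [pvCell g i (cols - 1 - d + i)] else l)]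
  rw [PySem.List.foldl_append_ite, PySem.List.foldl_append_ite]
  have hc1 : (fun i => decide (0 ≤ d - i ∧ d - i < cols)) =
      (fun i => decide (d - cols + 1 ≤ i ∧ i < d + 1)) := by
    funext i; exact decide_eq_decide.mpr (by omega)
  have hc2 : (fun i => decide (0 ≤ cols - 1 - d + i ∧ cols - 1 - d + i < cols)) =
      (fun i => decide (d - cols + 1 ≤ i ∧ i < d + 1)) := by
    funext i; exact decide_eq_decide.mpr (by omega)
  rw [hc1, hc2, pvFilterPyRange]
  simp only [pvEmit, pvD1, pvD2, List.nil_append]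

-- appending under modify, pointwise
theorem pvBumpGet (l : List (List String)) (m : Int) (hm : 0 ≤ m) (x : String) (k : Nat) :
    (pvBump l m x)[k]? = if (k : Int) = m then l[k]?.map (· ++ [x]) else l[k]? := by
  simp only [pvBump, List.getElem?_modify]
  by_cases h : m.toNat = k
  · have h' : (k : Int) = m := by omega
    simp [h, h', Option.map]
  · have h' : ¬((k : Int) = m) := by omega
    simp [h, h']

-- inner loop of B over j, first component
theorem pvBump1 (g : List String) (i cols : Int) (hi : 0 ≤ i) (nf : Nat) :
    ∀ (a : Int) (b : List (List String)), 0 ≤ a → (cols - a).toNat = nf → ∀ k : Nat,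
    ((PySem.List.pyRange a cols 1).foldl (fun l j => pvBump l (i + j) (pvCell g i j)) b)[k]? =
      if i + a ≤ (k : Int) ∧ (k : Int) < i + cols then
        b[k]?.map (· ++ [pvCell g i ((k : Int) - i)]) else b[k]? := by
  induction nf with
  | zero =>
    intro a b ha hf k
    rw [PySem.List.pyRange_one_eq_nil (by omega)]
    rw [if_neg (by omega)]
    rfl
  | succ n ih =>
    intro a b ha hf k
    rw [PySem.List.pyRange_one_cons (by omega), List.foldl_cons,
      ih (a + 1) _ (by omega) (by omega) k, pvBumpGet b (i + a) (by omega)]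
    by_cases hk : (k : Int) = i + a
    · have he : (k : Int) - i = a := by omega
      rw [if_neg (show ¬(i + (a + 1) ≤ (k : Int) ∧ (k : Int) < i + cols) by omega), if_pos hk,
        if_pos (show i + a ≤ (k : Int) ∧ (k : Int) < i + cols by omega), he]
    · rw [if_neg hk]
      split_ifs with h1 h2 <;> first | rfl | omega

-- inner loop of B over j, second component
theorem pvBump2 (g : List String) (i cols : Int) (hi : 0 ≤ i) (nf : Nat) :
    ∀ (a : Int) (b : List (List String)), 0 ≤ a → (cols - a).toNat = nf → ∀ k : Nat,
    ((PySem.List.pyRange a cols 1).foldl (fun l j => pvBump l (i - j + cols - 1) (pvCell g i j)) b)[k]? =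
      if i ≤ (k : Int) ∧ (k : Int) < i + cols - a then
        b[k]?.map (· ++ [pvCell g i (cols - 1 - (k : Int) + i)]) else b[k]? := by
  induction nf with
  | zero =>
    intro a b ha hf k
    rw [PySem.List.pyRange_one_eq_nil (by omega)]
    rw [if_neg (by omega)]
    rfl
  | succ n ih =>
    intro a b ha hf k
    rw [PySem.List.pyRange_one_cons (by omega), List.foldl_cons,
      ih (a + 1) _ (by omega) (by omega) k, pvBumpGet b (i - a + cols - 1) (by omega)]
    by_cases hk : (k : Int) = i - a + cols - 1
    · have he : cols - 1 - (k : Int) + i = a := by omega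
      rw [if_neg (show ¬(i ≤ (k : Int) ∧ (k : Int) < i + cols - (a + 1)) by omega), if_pos hk,
        if_pos (show i ≤ (k : Int) ∧ (k : Int) < i + cols - a by omega), he]
    · rw [if_neg hk]
      split_ifs with h1 h2 <;> first | rfl | omega

-- prepending one more row to the diagonal's valid row interval
theorem pvRangeSucc (cols : Int) (m k : Nat) (f : Int → String) :
    (PySem.List.pyRange (max 0 ((k : Int) - cols + 1)) (min ((m : Int) + 1) ((k : Int) + 1)) 1).map f =
    (if (m : Int) ≤ (k : Int) ∧ (k : Int) < (m : Int) + cols then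
      (PySem.List.pyRange (max 0 ((k : Int) - cols + 1)) (min (m : Int) ((k : Int) + 1)) 1).map f ++ [f (m : Int)]
    else
      (PySem.List.pyRange (max 0 ((k : Int) - cols + 1)) (min (m : Int) ((k : Int) + 1)) 1).map f) := by
  by_cases h : (m : Int) ≤ (k : Int) ∧ (k : Int) < (m : Int) + cols
  · rw [if_pos h]
    have h1 : min ((m : Int) + 1) ((k : Int) + 1) = (m : Int) + 1 := by omega
    have h2 : min (m : Int) ((k : Int) + 1) = (m : Int) := by omega
    rw [h1, h2, PySem.List.pyRange_one_succ_right (by omega), List.map_append, List.map_singleton]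
  · rw [if_neg h]
    by_cases hk : (k : Int) < (m : Int)
    · have : min ((m : Int) + 1) ((k : Int) + 1) = min (m : Int) ((k : Int) + 1) := by omega
      rw [this]
    · rw [PySem.List.pyRange_one_eq_nil (by omega), PySem.List.pyRange_one_eq_nil (by omega)]

-- the inner j-loop of B splits into its two components
theorem pvRowSplit (g : List String) (cols i : Int) (p : List (List String) × List (List String)) :
    (PySem.List.pyRange 0 cols 1).foldl (fun q j =>
      (pvBump q.1 (i + j) (pvCell g i j), pvBump q.2 (i - j + cols - 1) (pvCell g i j))) p =
    ((PySem.List.pyRange 0 cols 1).foldl (fun l j => pvBump l (i + j) (pvCell g i j)) p.1,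
     (PySem.List.pyRange 0 cols 1).foldl (fun l j => pvBump l (i - j + cols - 1) (pvCell g i j)) p.2) := by
  cases p with
  | mk a b =>
    simpa using pvFoldlProd (fun l j => pvBump l (i + j) (pvCell g i j))
      (fun l j => pvBump l (i - j + cols - 1) (pvCell g i j)) (PySem.List.pyRange 0 cols 1) a b

-- B's bucket pass over the first m rows: bucket k holds pvD1/pvD2 of the first m rows
theorem pvBuckets (g : List String) (cols : Int) (N : Nat) (m : Nat) :
    ∀ k : Nat,
    (((PySem.List.pyRange 0 (m : Int) 1).foldl
      (fun (p : List (List String) × List (List String)) i =>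
        (PySem.List.pyRange 0 cols 1).foldl (fun q j =>
          (pvBump q.1 (i + j) (pvCell g i j), pvBump q.2 (i - j + cols - 1) (pvCell g i j))) p)
      (List.replicate N [], List.replicate N [])).1[k]? =
        (if k < N then some (pvD1 g cols (m : Int) (k : Int)) else none)) ∧
    (((PySem.List.pyRange 0 (m : Int) 1).foldl
      (fun (p : List (List String) × List (List String)) i =>
        (PySem.List.pyRange 0 cols 1).foldl (fun q j =>
          (pvBump q.1 (i + j) (pvCell g i j), pvBump q.2 (i - j + cols - 1) (pvCell g i j))) p)
      (List.replicate N [], List.replicate N [])).2[k]? =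
        (if k < N then some (pvD2 g cols (m : Int) (k : Int)) else none)) := by
  induction m with
  | zero =>
    intro k
    rw [PySem.List.pyRange_one_eq_nil (show ((0 : Nat) : Int) ≤ 0 by omega), List.foldl_nil]
    have hD1 : pvD1 g cols ((0 : Nat) : Int) (k : Int) = [] := by
      rw [pvD1, PySem.List.pyRange_one_eq_nil (by omega)]; rfl
    have hD2 : pvD2 g cols ((0 : Nat) : Int) (k : Int) = [] := by
      rw [pvD2, PySem.List.pyRange_one_eq_nil (by omega)]; rfl
    rw [hD1, hD2]
    constructor <;> · rw [List.getElem?_replicate]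
  | succ m ih =>
    intro k
    obtain ⟨ih1, ih2⟩ := ih k
    have hsp : ((m + 1 : Nat) : Int) = (m : Int) + 1 := by push_cast; ring
    rw [hsp, PySem.List.pyRange_one_succ_right (by omega), List.foldl_append, List.foldl_cons,
      List.foldl_nil]
    simp only [pvRowSplit] at ih1 ih2 ⊢
    have hs1 : pvD1 g cols ((m : Int) + 1) (k : Int) =
        (if (m : Int) ≤ (k : Int) ∧ (k : Int) < (m : Int) + cols then
          pvD1 g cols (m : Int) (k : Int) ++ [pvCell g (m : Int) ((k : Int) - (m : Int))]
        else pvD1 g cols (m : Int) (k : Int)) := by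
      simp only [pvD1]; exact pvRangeSucc cols m k _
    have hs2 : pvD2 g cols ((m : Int) + 1) (k : Int) =
        (if (m : Int) ≤ (k : Int) ∧ (k : Int) < (m : Int) + cols then
          pvD2 g cols (m : Int) (k : Int) ++ [pvCell g (m : Int) (cols - 1 - (k : Int) + (m : Int))]
        else pvD2 g cols (m : Int) (k : Int)) := by
      simp only [pvD2]; exact pvRangeSucc cols m k _
    constructor
    · rw [pvBump1 g (m : Int) cols (by omega) (cols - 0).toNat 0 _ (by omega) rfl k, ih1, hs1]
      by_cases hN : k < N <;>
        by_cases hc2 : (m : Int) ≤ (k : Int) ∧ (k : Int) < (m : Int) + cols <;>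
        simp [hN, hc2, add_zero, apply_ite]
    · rw [pvBump2 g (m : Int) cols (by omega) (cols - 0).toNat 0 _ (by omega) rfl k, ih2, hs2]
      by_cases hN : k < N <;>
        by_cases hc2 : (m : Int) ≤ (k : Int) ∧ (k : Int) < (m : Int) + cols <;>
        simp [hN, hc2, sub_zero, apply_ite]

-- B's buckets, as lists
theorem pvBucketsList (g : List String) (cols : Int) (N : Nat) (m : Nat) :
    ((PySem.List.pyRange 0 (m : Int) 1).foldl
      (fun (p : List (List String) × List (List String)) i =>
        (PySem.List.pyRange 0 cols 1).foldl (fun q j =>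
          (pvBump q.1 (i + j) (pvCell g i j), pvBump q.2 (i - j + cols - 1) (pvCell g i j))) p)
      (List.replicate N [], List.replicate N [])) =
    ((List.range N).map (fun (k : Nat) => pvD1 g cols (m : Int) (k : Int)),
     (List.range N).map (fun (k : Nat) => pvD2 g cols (m : Int) (k : Int))) := by
  have h := pvBuckets g cols N m
  refine Prod.ext ?_ ?_ <;> apply List.ext_getElem? <;> intro k
  · rw [(h k).1, List.getElem?_map]
    by_cases hN : k < N
    · rw [List.getElem?_range hN]; simp [hN]
    · rw [List.getElem?_eq_none (by simpa using Nat.le_of_not_lt hN)]; simp [hN]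
  · rw [(h k).2, List.getElem?_map]
    by_cases hN : k < N
    · rw [List.getElem?_range hN]; simp [hN]
    · rw [List.getElem?_eq_none (by simpa using Nat.le_of_not_lt hN)]; simp [hN]

-- the two fold shapes coincide
theorem pvAssemble (g : List String) (R : Nat) (cols : Int) :
    (PySem.List.pyRange 0 ((R : Int) + cols - 1) 1).foldl (fun acc d =>
      pvEmit acc (pvD1 g cols (R : Int) d) (pvD2 g cols (R : Int) d)) [] =
    (((List.range ((R : Int) + cols - 1).toNat).map (fun (k : Nat) => pvD1 g cols (R : Int) (k : Int))).zip
      ((List.range ((R : Int) + cols - 1).toNat).map (fun (k : Nat) => pvD2 g cols (R : Int) (k : Int)))).foldl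
      (fun out ab => pvEmit out ab.1 ab.2) [] := by
  have hR : ∀ (F G : Nat → List String),
      (((List.range ((R : Int) + cols - 1).toNat).map F).zip
        ((List.range ((R : Int) + cols - 1).toNat).map G)).foldl
        (fun out ab => pvEmit out ab.1 ab.2) [] =
      (List.range ((R : Int) + cols - 1).toNat).foldl
        (fun out k => pvEmit out (F k) (G k)) [] := by
    intro F G
    rw [List.zip_map', List.foldl_map]
  rw [hR, PySem.List.pyRange_one, List.foldl_map,
    show ((R : Int) + cols - 1 - 0).toNat = ((R : Int) + cols - 1).toNat by omega]
  exact pvFoldlExt (fun acc k => by rw [zero_add]) _ _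

theorem pvMain (g : List String) : get_diagonals g = get_diagonals_alt g := by
  refine Eq.trans (b := (PySem.List.pyRange 0
      ((g.length : Int) + (((PySem.List.pyGet? g 0).getD "").length : Int) - 1) 1).foldl
      (fun acc d =>
        pvEmit acc (pvD1 g (((PySem.List.pyGet? g 0).getD "").length : Int) (g.length : Int) d)
          (pvD2 g (((PySem.List.pyGet? g 0).getD "").length : Int) (g.length : Int) d)) [])
    ?_ ?_
  · exact pvFoldlExt (fun acc d => pvStepA g (g.length : Int)
      (((PySem.List.pyGet? g 0).getD "").length : Int) acc d) _ _
  refine Eq.trans (pvAssemble g g.length (((PySem.List.pyGet? g 0).getD "").length : Int)) ?_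
  simp only [get_diagonals_alt]
  rw [pvBucketsList g (((PySem.List.pyGet? g 0).getD "").length : Int)
    ((g.length : Int) + (((PySem.List.pyGet? g 0).getD "").length : Int) - 1).toNat g.length]
  rfl

theorem get_diagonals_spec : Claim_equal_get_diagonals := by
  intro g _ _
  show get_diagonals g = get_diagonals_alt g
  exact pvMain g
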